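-- pv_equiv track=rewrite | github.com/patiza604/universal-manual-rag-chat | chatbot_backend/training/scripts/content_extractor.py | _classify_spec_category
-- ===== SOURCE A (Python) =====
-- def _classify_spec_category(spec_name: str) -> str:
--     """Classify the category of a specification"""
--     spec_lower = spec_name.lower()
--
--     if any(term in spec_lower for term in ['dimension', 'size', 'width', 'height', 'depth', 'weight']):
--         return 'physical'
--     elif any(term in spec_lower for term in ['power', 'voltage', 'current', 'wattage']):
--         return 'electrical'
--     elif any(term in spec_lower for term in ['speed', 'frequency', 'bandwidth', 'throughput']):
--         return 'performance'
--     elif any(term in spec_lower for term in ['temperature', 'humidity', 'environment']):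
--         return 'environmental'
--     elif any(term in spec_lower for term in ['compatible', 'support', 'requirement']):
--         return 'compatibility'
--     else:
--         return 'general'
-- ===== SOURCE B (Python) =====
-- # Flat keyword->priority map; one full scan computing the minimum matching
-- # priority, then a table lookup -- no per-category early-return chain.
-- _KEYWORD_PRIORITY = {
--     'dimension': 0, 'size': 0, 'width': 0, 'height': 0, 'depth': 0, 'weight': 0,
--     'power': 1, 'voltage': 1, 'current': 1, 'wattage': 1,
--     'speed': 2, 'frequency': 2, 'bandwidth': 2, 'throughput': 2,
--     'temperature': 3, 'humidity': 3, 'environment': 3,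
--     'compatible': 4, 'support': 4, 'requirement': 4,
-- }
-- _CATEGORIES = ['physical', 'electrical', 'performance', 'environmental',
--                'compatibility', 'general']
--
-- def _classify_spec_category(spec_name: str) -> str:
--     spec_lower = spec_name.lower()
--     best = 5
--     for kw, pri in _KEYWORD_PRIORITY.items():
--         if kw in spec_lower:
--             best = min(best, pri)
--     return _CATEGORIES[best]
-- ===== Notes on version B (the rewrite author's own statement) =====
-- stated objective: alternative
-- what changed: Replaces the ordered if/elif chain of per-category any() scans with a flat keyword-to-priority map scanned once in full, reducing with min over the priorities of all matching keywords and indexing a category table at the end (no early return, no category grouping).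
import Mathlib
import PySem

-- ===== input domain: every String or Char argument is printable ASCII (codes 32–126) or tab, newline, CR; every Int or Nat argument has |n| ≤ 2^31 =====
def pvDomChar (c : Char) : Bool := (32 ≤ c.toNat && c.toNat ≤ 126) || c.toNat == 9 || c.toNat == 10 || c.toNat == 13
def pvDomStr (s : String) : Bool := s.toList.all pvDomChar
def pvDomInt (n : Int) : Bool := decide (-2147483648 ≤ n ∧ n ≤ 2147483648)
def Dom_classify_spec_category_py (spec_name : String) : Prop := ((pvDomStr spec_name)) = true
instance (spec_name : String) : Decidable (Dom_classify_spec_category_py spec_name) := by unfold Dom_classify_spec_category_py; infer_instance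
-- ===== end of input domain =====

-- B replaces the if/elif per-category keyword chain with one full min-reduction over a flat keyword->priority map plus a final table lookup; same result, same cost.


-- ===== PORT A =====
-- A: chain of if/elif, each testing any(term in spec_lower for term in [...])
def classify_spec_category_py (spec_name : String) : String :=
  let spec_lower := PySem.Str.lower spec_name
  if ["dimension", "size", "width", "height", "depth", "weight"].any (fun term => PySem.Str.isIn term spec_lower) then
    "physical"
  else if ["power", "voltage", "current", "wattage"].any (fun term => PySem.Str.isIn term spec_lower) then
    "electrical"
  else if ["speed", "frequency", "bandwidth", "throughput"].any (fun term => PySem.Str.isIn term spec_lower) then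
    "performance"
  else if ["temperature", "humidity", "environment"].any (fun term => PySem.Str.isIn term spec_lower) then
    "environmental"
  else if ["compatible", "support", "requirement"].any (fun term => PySem.Str.isIn term spec_lower) then
    "compatibility"
  else
    "general"

-- ===== PORT B =====
-- B: flat keyword->priority dict (insertion order), min-reduction, table lookup
def pvKeywordPriority : List (String × Nat) :=
  [("dimension", 0), ("size", 0), ("width", 0), ("height", 0), ("depth", 0), ("weight", 0),
   ("power", 1), ("voltage", 1), ("current", 1), ("wattage", 1),
   ("speed", 2), ("frequency", 2), ("bandwidth", 2), ("throughput", 2),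
   ("temperature", 3), ("humidity", 3), ("environment", 3),
   ("compatible", 4), ("support", 4), ("requirement", 4)]

def pvCategories : List String :=
  ["physical", "electrical", "performance", "environmental", "compatibility", "general"]

def classify_spec_category_py_alt (spec_name : String) : String :=
  let spec_lower := PySem.Str.lower spec_name
  let best := pvKeywordPriority.foldl
    (fun best e => if PySem.Str.isIn e.1 spec_lower then min best e.2 else best) 5
  -- _CATEGORIES[best]: best is always < 6, so plain getD is the exact index access
  pvCategories.getD best "general"

-- ===== PRECONDITION & SPEC =====
def Spec_classify_spec_category_py (spec_name : String) (out : String) : Prop := out = classify_spec_category_py_alt spec_name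
instance (spec_name : String) (out : String) : Decidable (Spec_classify_spec_category_py spec_name out) := by unfold Spec_classify_spec_category_py; infer_instance

-- ===== CLAIM =====
def Claim_equal_classify_spec_category_py : Prop := ∀ (spec_name : String), Dom_classify_spec_category_py spec_name → Spec_classify_spec_category_py spec_name (classify_spec_category_py spec_name)

-- ===== LEMMAS AND PROOFS =====

-- folding a constant-priority block with min = conditional single min (p abstract)
theorem pvGroupFold (p : String → Bool) (ws : List String) (k b : Nat) :
    List.foldl (fun best e => if p e.1 then min best e.2 else best) b
      (ws.map (fun w => (w, k)))
      = if ws.any p then min b k else b := by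
  induction ws generalizing b with
  | nil => simp
  | cons w ws ih =>
    simp only [List.map, List.foldl, List.any_cons]
    by_cases h : p w = true
    · simp only [h, if_true, Bool.true_or, ih, min_assoc, min_self]
      split <;> rfl
    · simp only [h, Bool.false_or, ih]
      simp

-- pvKeywordPriority is the concatenation of five constant-priority blocks
theorem pvKeywordPriority_eq :
    pvKeywordPriority
      = (["dimension", "size", "width", "height", "depth", "weight"].map (fun w => (w, 0)))
        ++ (["power", "voltage", "current", "wattage"].map (fun w => (w, 1)))
        ++ (["speed", "frequency", "bandwidth", "throughput"].map (fun w => (w, 2)))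
        ++ (["temperature", "humidity", "environment"].map (fun w => (w, 3)))
        ++ (["compatible", "support", "requirement"].map (fun w => (w, 4))) := rfl

-- the whole equivalence, stated over an abstract membership predicate p
theorem pvKey (p : String → Bool) :
    (if ["dimension", "size", "width", "height", "depth", "weight"].any p then "physical"
     else if ["power", "voltage", "current", "wattage"].any p then "electrical"
     else if ["speed", "frequency", "bandwidth", "throughput"].any p then "performance"
     else if ["temperature", "humidity", "environment"].any p then "environmental"
     else if ["compatible", "support", "requirement"].any p then "compatibility"
     else "general")
      = pvCategories.getD
          (pvKeywordPriority.foldl (fun best e => if p e.1 then min best e.2 else best) 5)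
          "general" := by
  rw [pvKeywordPriority_eq]
  simp only [List.foldl_append, pvGroupFold]
  by_cases g0 : (["dimension", "size", "width", "height", "depth", "weight"].any p) = true <;>
  by_cases g1 : (["power", "voltage", "current", "wattage"].any p) = true <;>
  by_cases g2 : (["speed", "frequency", "bandwidth", "throughput"].any p) = true <;>
  by_cases g3 : (["temperature", "humidity", "environment"].any p) = true <;>
  by_cases g4 : (["compatible", "support", "requirement"].any p) = true <;>
  simp [g0, g1, g2, g3, g4, pvCategories]

-- ===== VERDICT =====
theorem classify_spec_category_py_spec : Claim_equal_classify_spec_category_py := by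
  intro s _
  unfold Spec_classify_spec_category_py classify_spec_category_py classify_spec_category_py_alt
  exact pvKey (fun w => PySem.Str.isIn w (PySem.Str.lower s))
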